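-- pv_equiv track=rewrite | github.com/insighteleven-design/football-finance-dashboard | scripts/enrich_squad_profiles.py | build_age_profile
-- ===== SOURCE A (Python) =====
-- from typing import Dict, List, Optional, Tuple
--
-- def build_age_profile(players: list) -> Optional[dict]:
--     """Bucket players into age bands. Returns None if no age data."""
--     bands: Dict[str, int] = {
--         "under_21": 0, "age_21_23": 0, "age_24_26": 0,
--         "age_27_29": 0, "over_30": 0,
--     }
--     counted = 0
--     for p in players:
--         age = p.get("age")
--         if not isinstance(age, int):
--             continue
--         counted += 1
--         if age < 21:
--             bands["under_21"] += 1
--         elif age <= 23: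
--             bands["age_21_23"] += 1
--         elif age <= 26:
--             bands["age_24_26"] += 1
--         elif age <= 29:
--             bands["age_27_29"] += 1
--         else:
--             bands["over_30"] += 1
--     return bands if counted > 0 else None
-- ===== SOURCE B (Python) =====
-- from typing import Dict, List, Optional, Tuple
--
-- def build_age_profile(players: list) -> Optional[dict]:
--     """Bucket players into age bands. Returns None if no age data."""
--     ages = [p["age"] for p in players if isinstance(p.get("age"), int)]
--     if not ages:
--         return None
--     return {
--         "under_21": sum(1 for a in ages if a < 21),
--         "age_21_23": sum(1 for a in ages if 21 <= a <= 23),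
--         "age_24_26": sum(1 for a in ages if 24 <= a <= 26),
--         "age_27_29": sum(1 for a in ages if 27 <= a <= 29),
--         "over_30": sum(1 for a in ages if a >= 30),
--     }
-- ===== Notes on version B (the rewrite author's own statement) =====
-- stated objective: alternative
-- what changed: Replaced the single mutating pass (dict of accumulators updated through a five-way elif ladder) by staged passes: first extract the list of integer ages, return None if it is empty, then build the result dict directly with one independent counting pass per band using interval predicates.
import Mathlib
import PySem

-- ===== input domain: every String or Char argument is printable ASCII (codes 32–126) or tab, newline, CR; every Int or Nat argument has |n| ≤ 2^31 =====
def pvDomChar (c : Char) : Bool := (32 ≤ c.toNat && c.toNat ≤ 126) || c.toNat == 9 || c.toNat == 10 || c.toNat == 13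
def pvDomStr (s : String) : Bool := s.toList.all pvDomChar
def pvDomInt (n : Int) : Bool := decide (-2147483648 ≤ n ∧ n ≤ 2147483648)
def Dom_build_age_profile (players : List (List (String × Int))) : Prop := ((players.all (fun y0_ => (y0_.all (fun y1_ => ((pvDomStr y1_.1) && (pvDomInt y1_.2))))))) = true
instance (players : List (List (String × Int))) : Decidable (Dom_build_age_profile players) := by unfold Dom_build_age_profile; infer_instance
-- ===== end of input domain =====

-- B replaces A's single mutating pass (accumulator dict + elif ladder) by staged passes: extract the ages list, then one independent counting pass per band; alternative decomposition, same cost.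

-- ===== PORT A =====
def build_age_profile (players : List (List (String × Int))) : Option (List (String × Int)) :=
  let bands0 : PySem.Dict String Int :=
    PySem.Dict.ofList [("under_21", 0), ("age_21_23", 0), ("age_24_26", 0), ("age_27_29", 0), ("over_30", 0)]
  let res := players.foldl (fun (st : PySem.Dict String Int × Int) (p : List (String × Int)) =>
    match (PySem.Dict.mk p).get? "age" with   -- p.get("age"); values are Int, so isinstance(age, int) holds iff the key is present
    | none => st
    | some age =>
      let counted := st.2 + 1
      let bands :=
        if age < 21 then st.1.modify "under_21" 0 (· + 1)
        else if age ≤ 23 then st.1.modify "age_21_23" 0 (· + 1)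
        else if age ≤ 26 then st.1.modify "age_24_26" 0 (· + 1)
        else if age ≤ 29 then st.1.modify "age_27_29" 0 (· + 1)
        else st.1.modify "over_30" 0 (· + 1)
      (bands, counted)) (bands0, (0 : Int))
  if res.2 > 0 then some res.1.items else none

-- ===== PORT B =====
def build_age_profile_alt (players : List (List (String × Int))) : Option (List (String × Int)) :=
  -- ages = [p["age"] for p in players if isinstance(p.get("age"), int)]
  let ages : List Int := players.filterMap (fun p => (PySem.Dict.mk p).get? "age")
  if ages.isEmpty then none
  else some [
    ("under_21", (ages.countP (fun a => decide (a < 21)) : Int)),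
    ("age_21_23", (ages.countP (fun a => decide (21 ≤ a ∧ a ≤ 23)) : Int)),
    ("age_24_26", (ages.countP (fun a => decide (24 ≤ a ∧ a ≤ 26)) : Int)),
    ("age_27_29", (ages.countP (fun a => decide (27 ≤ a ∧ a ≤ 29)) : Int)),
    ("over_30", (ages.countP (fun a => decide (30 ≤ a)) : Int))]

-- ===== PRECONDITION & SPEC =====
def Spec_build_age_profile (players : List (List (String × Int))) (out : Option (List (String × Int))) : Prop := out = build_age_profile_alt players
instance (players : List (List (String × Int))) (out : Option (List (String × Int))) : Decidable (Spec_build_age_profile players out) := by unfold Spec_build_age_profile; infer_instance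

-- ===== CLAIM (what is proved, stated in full; the proofs are below) =====
def Claim_equal_build_age_profile : Prop := ∀ (players : List (List (String × Int))), Dom_build_age_profile players → Spec_build_age_profile players (build_age_profile players)

-- ===== LEMMAS AND PROOFS =====

-- loop invariant: A's fold over the players, started at explicit band counts (c0..c4) and count n,
-- adds to each the per-band count of the extracted ages and the number of ages
theorem pv_inv (players : List (List (String × Int))) (c0 c1 c2 c3 c4 n : Int) :
    players.foldl (fun (st : PySem.Dict String Int × Int) (p : List (String × Int)) =>
      match (PySem.Dict.mk p).get? "age" with
      | none => st
      | some age =>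
        let counted := st.2 + 1
        let bands :=
          if age < 21 then st.1.modify "under_21" 0 (· + 1)
          else if age ≤ 23 then st.1.modify "age_21_23" 0 (· + 1)
          else if age ≤ 26 then st.1.modify "age_24_26" 0 (· + 1)
          else if age ≤ 29 then st.1.modify "age_27_29" 0 (· + 1)
          else st.1.modify "over_30" 0 (· + 1)
        (bands, counted))
      (PySem.Dict.mk [("under_21", c0), ("age_21_23", c1), ("age_24_26", c2), ("age_27_29", c3), ("over_30", c4)], n)
    = (PySem.Dict.mk [
        ("under_21", c0 + ((players.filterMap (fun p => (PySem.Dict.mk p).get? "age")).countP (fun a => decide (a < 21)) : Int)),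
        ("age_21_23", c1 + ((players.filterMap (fun p => (PySem.Dict.mk p).get? "age")).countP (fun a => decide (21 ≤ a ∧ a ≤ 23)) : Int)),
        ("age_24_26", c2 + ((players.filterMap (fun p => (PySem.Dict.mk p).get? "age")).countP (fun a => decide (24 ≤ a ∧ a ≤ 26)) : Int)),
        ("age_27_29", c3 + ((players.filterMap (fun p => (PySem.Dict.mk p).get? "age")).countP (fun a => decide (27 ≤ a ∧ a ≤ 29)) : Int)),
        ("over_30", c4 + ((players.filterMap (fun p => (PySem.Dict.mk p).get? "age")).countP (fun a => decide (30 ≤ a)) : Int))],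
       n + ((players.filterMap (fun p => (PySem.Dict.mk p).get? "age")).length : Int)) := by
  induction players generalizing c0 c1 c2 c3 c4 n with
  | nil => simp
  | cons p ps ih =>
    simp only [List.foldl_cons, List.filterMap_cons]
    cases h : (PySem.Dict.mk p).get? "age" with
    | none => simpa using ih c0 c1 c2 c3 c4 n
    | some age =>
      by_cases h1 : age < 21
      · simp only [h1, if_true]
        rw [show (PySem.Dict.mk [("under_21", c0), ("age_21_23", c1), ("age_24_26", c2), ("age_27_29", c3), ("over_30", c4)]).modify "under_21" 0 (· + 1)
            = PySem.Dict.mk [("under_21", c0 + 1), ("age_21_23", c1), ("age_24_26", c2), ("age_27_29", c3), ("over_30", c4)] from rfl]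
        rw [ih (c0 + 1) c1 c2 c3 c4 (n + 1)]
        have e0 : decide (age < 21) = true := by simp; omega
        have e1 : decide (21 ≤ age ∧ age ≤ 23) = false := by simp; omega
        have e2 : decide (24 ≤ age ∧ age ≤ 26) = false := by simp; omega
        have e3 : decide (27 ≤ age ∧ age ≤ 29) = false := by simp; omega
        have e4 : decide (30 ≤ age) = false := by simp; omega
        simp only [List.countP_cons, List.length_cons, e0, e1, e2, e3, e4, if_true, Prod.mk.injEq, PySem.Dict.mk.injEq, List.cons.injEq, and_true, true_and]
        refine ⟨⟨?_, ?_, ?_, ?_, ?_⟩, ?_⟩ <;> push_cast <;> omega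
      · by_cases h2 : age ≤ 23
        · simp only [h1, h2, if_false, if_true]
          rw [show (PySem.Dict.mk [("under_21", c0), ("age_21_23", c1), ("age_24_26", c2), ("age_27_29", c3), ("over_30", c4)]).modify "age_21_23" 0 (· + 1)
              = PySem.Dict.mk [("under_21", c0), ("age_21_23", c1 + 1), ("age_24_26", c2), ("age_27_29", c3), ("over_30", c4)] from rfl]
          rw [ih c0 (c1 + 1) c2 c3 c4 (n + 1)]
          have e0 : decide (age < 21) = false := by simp; omega
          have e1 : decide (21 ≤ age ∧ age ≤ 23) = true := by simp; omega
          have e2 : decide (24 ≤ age ∧ age ≤ 26) = false := by simp; omega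
          have e3 : decide (27 ≤ age ∧ age ≤ 29) = false := by simp; omega
          have e4 : decide (30 ≤ age) = false := by simp; omega
          simp only [List.countP_cons, List.length_cons, e0, e1, e2, e3, e4, if_true, Prod.mk.injEq, PySem.Dict.mk.injEq, List.cons.injEq, and_true, true_and]
          refine ⟨⟨?_, ?_, ?_, ?_, ?_⟩, ?_⟩ <;> push_cast <;> omega
        · by_cases h3 : age ≤ 26
          · simp only [h1, h2, h3, if_false, if_true]
            rw [show (PySem.Dict.mk [("under_21", c0), ("age_21_23", c1), ("age_24_26", c2), ("age_27_29", c3), ("over_30", c4)]).modify "age_24_26" 0 (· + 1)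
                = PySem.Dict.mk [("under_21", c0), ("age_21_23", c1), ("age_24_26", c2 + 1), ("age_27_29", c3), ("over_30", c4)] from rfl]
            rw [ih c0 c1 (c2 + 1) c3 c4 (n + 1)]
            have e0 : decide (age < 21) = false := by simp; omega
            have e1 : decide (21 ≤ age ∧ age ≤ 23) = false := by simp; omega
            have e2 : decide (24 ≤ age ∧ age ≤ 26) = true := by simp; omega
            have e3 : decide (27 ≤ age ∧ age ≤ 29) = false := by simp; omega
            have e4 : decide (30 ≤ age) = false := by simp; omega
            simp only [List.countP_cons, List.length_cons, e0, e1, e2, e3, e4, if_true, Prod.mk.injEq, PySem.Dict.mk.injEq, List.cons.injEq, and_true, true_and]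
            refine ⟨⟨?_, ?_, ?_, ?_, ?_⟩, ?_⟩ <;> push_cast <;> omega
          · by_cases h4 : age ≤ 29
            · simp only [h1, h2, h3, h4, if_false, if_true]
              rw [show (PySem.Dict.mk [("under_21", c0), ("age_21_23", c1), ("age_24_26", c2), ("age_27_29", c3), ("over_30", c4)]).modify "age_27_29" 0 (· + 1)
                  = PySem.Dict.mk [("under_21", c0), ("age_21_23", c1), ("age_24_26", c2), ("age_27_29", c3 + 1), ("over_30", c4)] from rfl]
              rw [ih c0 c1 c2 (c3 + 1) c4 (n + 1)]
              have e0 : decide (age < 21) = false := by simp; omega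
              have e1 : decide (21 ≤ age ∧ age ≤ 23) = false := by simp; omega
              have e2 : decide (24 ≤ age ∧ age ≤ 26) = false := by simp; omega
              have e3 : decide (27 ≤ age ∧ age ≤ 29) = true := by simp; omega
              have e4 : decide (30 ≤ age) = false := by simp; omega
              simp only [List.countP_cons, List.length_cons, e0, e1, e2, e3, e4, if_true, Prod.mk.injEq, PySem.Dict.mk.injEq, List.cons.injEq, and_true, true_and]
              refine ⟨⟨?_, ?_, ?_, ?_, ?_⟩, ?_⟩ <;> push_cast <;> omega
            · simp only [h1, h2, h3, h4, if_false]
              rw [show (PySem.Dict.mk [("under_21", c0), ("age_21_23", c1), ("age_24_26", c2), ("age_27_29", c3), ("over_30", c4)]).modify "over_30" 0 (· + 1)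
                  = PySem.Dict.mk [("under_21", c0), ("age_21_23", c1), ("age_24_26", c2), ("age_27_29", c3), ("over_30", c4 + 1)] from rfl]
              rw [ih c0 c1 c2 c3 (c4 + 1) (n + 1)]
              have e0 : decide (age < 21) = false := by simp; omega
              have e1 : decide (21 ≤ age ∧ age ≤ 23) = false := by simp; omega
              have e2 : decide (24 ≤ age ∧ age ≤ 26) = false := by simp; omega
              have e3 : decide (27 ≤ age ∧ age ≤ 29) = false := by simp; omega
              have e4 : decide (30 ≤ age) = true := by simp; omega
              simp only [List.countP_cons, List.length_cons, e0, e1, e2, e3, e4, if_true, Prod.mk.injEq, PySem.Dict.mk.injEq, List.cons.injEq, and_true, true_and]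
              refine ⟨⟨?_, ?_, ?_, ?_, ?_⟩, ?_⟩ <;> push_cast <;> omega

-- ===== VERDICT (by name: the statement is the Claim_ definition above) =====
theorem build_age_profile_spec : Claim_equal_build_age_profile := by
  intro players _
  unfold Spec_build_age_profile
  simp only [build_age_profile, build_age_profile_alt]
  rw [show (PySem.Dict.ofList [("under_21", (0:Int)), ("age_21_23", 0), ("age_24_26", 0), ("age_27_29", 0), ("over_30", 0)])
      = PySem.Dict.mk [("under_21", 0), ("age_21_23", 0), ("age_24_26", 0), ("age_27_29", 0), ("over_30", 0)] from rfl]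
  rw [pv_inv players 0 0 0 0 0 0]
  cases hl : players.filterMap (fun p => (PySem.Dict.mk p).get? "age") with
  | nil => simp
  | cons a l =>
    simp [List.isEmpty_cons]
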